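-- pv_equiv track=rewrite | github.com/Iljb/uav_dataset_generator | generator/planner.py | _replace_primary_navigation_role
-- ===== SOURCE A (Python) =====
-- OBSTACLE_AVOID_ROLE = "navigation.obstacle_avoid"
--
-- def _replace_primary_navigation_role(route_roles: list[str]) -> list[str]:
--     replaced = False
--     output: list[str] = []
--     for role in route_roles:
--         if role.startswith("navigation.") and not replaced:
--             output.append(OBSTACLE_AVOID_ROLE)
--             replaced = True
--         else:
--             output.append(role)
--     if not replaced:
--         output.append(OBSTACLE_AVOID_ROLE)
--     return output
-- ===== SOURCE B (Python) =====
-- OBSTACLE_AVOID_ROLE = "navigation.obstacle_avoid"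
--
-- def _replace_primary_navigation_role(route_roles: list[str]) -> list[str]:
--     idx = next((i for i, role in enumerate(route_roles)
--                 if role.startswith("navigation.")), None)
--     if idx is None:
--         return route_roles + [OBSTACLE_AVOID_ROLE]
--     return route_roles[:idx] + [OBSTACLE_AVOID_ROLE] + route_roles[idx + 1:]
-- ===== Notes on version B (the rewrite author's own statement) =====
-- stated objective: simpler
-- what changed: Replaces the flag-carrying accumulation loop with a locate-then-slice decomposition: find the first 'navigation.'-prefixed role's index, then rebuild via slicing and concatenation.
import Mathlib
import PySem

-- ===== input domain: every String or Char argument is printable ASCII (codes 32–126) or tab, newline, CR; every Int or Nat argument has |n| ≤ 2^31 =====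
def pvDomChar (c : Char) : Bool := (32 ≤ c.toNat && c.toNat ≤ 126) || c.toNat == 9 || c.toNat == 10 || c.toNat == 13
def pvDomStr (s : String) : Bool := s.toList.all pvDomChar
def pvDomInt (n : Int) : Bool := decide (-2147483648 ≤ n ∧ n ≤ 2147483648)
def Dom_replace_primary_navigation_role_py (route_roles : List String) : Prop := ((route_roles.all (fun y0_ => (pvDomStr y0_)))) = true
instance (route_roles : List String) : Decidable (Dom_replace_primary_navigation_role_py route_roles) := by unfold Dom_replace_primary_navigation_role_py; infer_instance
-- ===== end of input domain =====

-- B replaces A's flag-carrying accumulation loop with locate-then-slice (simpler decomposition); return value only, no mutation.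

-- ===== PORT A =====
def pvObstacleAvoidRole : String := "navigation.obstacle_avoid"

def replace_primary_navigation_role_py (route_roles : List String) : List String :=
  let st := route_roles.foldl
    (fun (acc : Bool × List String) role =>
      if PySem.Str.startswith role "navigation." && !acc.1 then
        (true, acc.2 ++ [pvObstacleAvoidRole])
      else
        (acc.1, acc.2 ++ [role]))
    (false, [])
  if !st.1 then st.2 ++ [pvObstacleAvoidRole] else st.2

-- ===== PORT B =====
def replace_primary_navigation_role_py_alt (route_roles : List String) : List String :=
  match route_roles.findIdx? (fun role => PySem.Str.startswith role "navigation.") with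
  | none => route_roles ++ [pvObstacleAvoidRole]
  | some i => route_roles.take i ++ [pvObstacleAvoidRole] ++ route_roles.drop (i + 1)

-- ===== PRECONDITION & SPEC =====
def Spec_replace_primary_navigation_role_py (route_roles : List String) (out : List String) : Prop := out = replace_primary_navigation_role_py_alt route_roles
instance (route_roles : List String) (out : List String) : Decidable (Spec_replace_primary_navigation_role_py route_roles out) := by unfold Spec_replace_primary_navigation_role_py; infer_instance

-- ===== CLAIM (what is proved, stated in full; the proofs are below) =====
def Claim_equal_replace_primary_navigation_role_py : Prop := ∀ (route_roles : List String), Dom_replace_primary_navigation_role_py route_roles → Spec_replace_primary_navigation_role_py route_roles (replace_primary_navigation_role_py route_roles)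

-- ===== LEMMAS AND PROOFS =====

-- once the flag is true, the loop just copies the rest
theorem pv_loop_true (rs : List String) (out : List String) :
    rs.foldl
      (fun (acc : Bool × List String) role =>
        if PySem.Str.startswith role "navigation." && !acc.1 then
          (true, acc.2 ++ [pvObstacleAvoidRole])
        else
          (acc.1, acc.2 ++ [role]))
      (true, out) = (true, out ++ rs) := by
  induction rs generalizing out with
  | nil => simp
  | cons r rs ih =>
    simp only [List.foldl_cons, Bool.not_true, Bool.and_false]
    rw [if_neg (by simp), ih]
    simp

-- the loop started with flag false, characterised by findIdx?
theorem pv_loop_false (rs : List String) (out : List String) :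
    rs.foldl
      (fun (acc : Bool × List String) role =>
        if PySem.Str.startswith role "navigation." && !acc.1 then
          (true, acc.2 ++ [pvObstacleAvoidRole])
        else
          (acc.1, acc.2 ++ [role]))
      (false, out) =
    match rs.findIdx? (fun role => PySem.Str.startswith role "navigation.") with
    | none => (false, out ++ rs)
    | some i => (true, out ++ rs.take i ++ [pvObstacleAvoidRole] ++ rs.drop (i + 1)) := by
  induction rs generalizing out with
  | nil => simp
  | cons r rs ih =>
    by_cases h : PySem.Str.startswith r "navigation." = true
    · simp only [List.foldl_cons, Bool.not_false, Bool.and_true]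
      rw [if_pos h, pv_loop_true, List.findIdx?_cons, if_pos h]
      simp
    · simp only [List.foldl_cons, Bool.not_false, Bool.and_true]
      rw [if_neg h, ih, List.findIdx?_cons, if_neg h]
      cases hf : rs.findIdx? (fun role => PySem.Str.startswith role "navigation.") with
      | none => simp
      | some i => simp

-- ===== VERDICT (by name: the statement is the Claim_ definition above) =====
theorem replace_primary_navigation_role_py_spec : Claim_equal_replace_primary_navigation_role_py := by
  intro rs _
  unfold Spec_replace_primary_navigation_role_py
  unfold replace_primary_navigation_role_py replace_primary_navigation_role_py_alt
  rw [pv_loop_false]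
  cases hf : rs.findIdx? (fun role => PySem.Str.startswith role "navigation.") with
  | none => simp
  | some i => simp
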